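-- pv_equiv track=rewrite | github.com/fabiogaluppo/AdventOfCode2020 | day_24.py | lineToMoves
-- ===== SOURCE A (Python) =====
-- def lineToMoves(line):
--     i, N = 0, len(line)
--     moves = []
--     while i < N:
--         if line[i] == 'n' or line[i] == 's':
--             moves.append(line[i:i + 2])
--             i += 2
--         else:
--             moves.append(line[i])
--             i += 1
--     return moves
-- ===== SOURCE B (Python) =====
-- import re
--
-- def lineToMoves(line):
--     # Regex tokenizer: an n/s plus any following character (DOTALL so '.' also
--     # matches newlines), otherwise any single character; ordered alternation
--     # reproduces the greedy two-char grouping, incl. a lone trailing n/s.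
--     return re.findall(r'[ns].|.', line, re.DOTALL)
-- ===== Notes on version B (the rewrite author's own statement) =====
-- stated objective: idiomatic
-- what changed: Replaces the manual index-advancing while loop with a single regex findall whose ordered alternation '[ns].|.' lets the regex engine do the two-char-after-n/s grouping.
import Mathlib
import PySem

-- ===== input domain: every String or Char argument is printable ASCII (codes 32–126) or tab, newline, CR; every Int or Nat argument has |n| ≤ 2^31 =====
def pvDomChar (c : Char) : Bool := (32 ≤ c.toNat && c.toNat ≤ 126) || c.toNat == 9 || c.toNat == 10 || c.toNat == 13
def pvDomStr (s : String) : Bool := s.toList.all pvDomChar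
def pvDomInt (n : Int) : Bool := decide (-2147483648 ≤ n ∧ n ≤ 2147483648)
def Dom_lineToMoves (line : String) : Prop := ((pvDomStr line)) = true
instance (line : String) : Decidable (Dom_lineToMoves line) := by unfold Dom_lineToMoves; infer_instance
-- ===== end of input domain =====

-- B replaces A's index-advancing while loop by a regex tokenizer (re.findall with ordered alternation); same output, more idiomatic.

-- ===== PORT A =====
-- while i < N: grouped two chars after 'n'/'s' (line[i:i+2]), else one char; i advances by 2 or 1.
def lineToMovesLoop (cs : List Char) (i : Nat) : List String :=
  if h : i < cs.length then
    if cs[i] = 'n' ∨ cs[i] = 's' then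
      String.ofList (PySem.List.slice cs (some (i : Int)) (some ((i : Int) + 2))) :: lineToMovesLoop cs (i + 2)
    else
      String.ofList [cs[i]] :: lineToMovesLoop cs (i + 1)
  else []
termination_by cs.length - i

def lineToMoves (line : String) : List String := lineToMovesLoop line.toList 0

-- ===== PORT B =====
-- Transliteration of re.findall(r'[ns].|.', line, re.DOTALL): the engine scans left to right,
-- at each position trying the first alternative '[ns].' (an n/s plus ANY character, DOTALL),
-- falling back to '.' (one character); matches are consumed, non-overlapping.
def reFindAllNS : List Char → List String
  | [] => []
  | [c] => [String.ofList [c]]               -- alternative '[ns].' cannot match at the last position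
  | c :: d :: rest =>
    if c = 'n' ∨ c = 's' then String.ofList [c, d] :: reFindAllNS rest
    else String.ofList [c] :: reFindAllNS (d :: rest)

def lineToMoves_alt (line : String) : List String := reFindAllNS line.toList

-- ===== PRECONDITION & SPEC =====
def Spec_lineToMoves (line : String) (out : List String) : Prop := out = lineToMoves_alt line
instance (line : String) (out : List String) : Decidable (Spec_lineToMoves line out) := by unfold Spec_lineToMoves; infer_instance

-- ===== CLAIM (what is proved, stated in full; the proofs are below) =====
def Claim_equal_lineToMoves : Prop := ∀ (line : String), Dom_lineToMoves line → Spec_lineToMoves line (lineToMoves line)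

-- ===== LEMMAS AND PROOFS =====
lemma loop_eq_reFindAll (cs : List Char) (i : Nat) :
    lineToMovesLoop cs i = reFindAllNS (cs.drop i) := by
  fun_induction lineToMovesLoop cs i with
  | case1 i h hns ih =>
    have hd : cs.drop i = cs[i] :: cs.drop (i + 1) := List.drop_eq_getElem_cons h
    have hslice : PySem.List.slice cs (some (i : Int)) (some ((i : Int) + 2))
        = (cs.drop i).take 2 := by
      have := PySem.List.slice_natCast_add cs i 2
      simpa using this
    by_cases h1 : i + 1 < cs.length
    · have hd1 : cs.drop (i + 1) = cs[i + 1] :: cs.drop (i + 2) :=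
        List.drop_eq_getElem_cons h1
      have hslice2 : (cs.drop i).take 2 = [cs[i], cs[i + 1]] := by rw [hd, hd1]; rfl
      rw [hslice, hslice2, hd, hd1, ih]
      simp [reFindAllNS, hns]
    · have hnil : cs.drop (i + 1) = [] := List.drop_eq_nil_of_le (by omega)
      have hnil2 : cs.drop (i + 2) = [] := List.drop_eq_nil_of_le (by omega)
      rw [hslice, hd, hnil]
      rw [show lineToMovesLoop cs (i + 2) = reFindAllNS (cs.drop (i + 2)) from ih]
      simp [reFindAllNS, hnil2]
  | case2 i h hns ih =>
    have hd : cs.drop i = cs[i] :: cs.drop (i + 1) := List.drop_eq_getElem_cons h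
    rw [hd, ih]
    cases hrest : cs.drop (i + 1) with
    | nil => simp [reFindAllNS]
    | cons d rest => simp [reFindAllNS, hns]
  | case3 i h =>
    have : cs.drop i = [] := List.drop_eq_nil_of_le (by omega)
    simp [this, reFindAllNS]

-- ===== VERDICT (by name: the statement is the Claim_ definition above) =====
theorem lineToMoves_spec : Claim_equal_lineToMoves := by
  intro line _
  unfold Spec_lineToMoves lineToMoves lineToMoves_alt
  simpa using loop_eq_reFindAll line.toList 0
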